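-- pv_equiv track=rewrite | github.com/chrhein/metaheuristics | metaheuristics_project/tools/route_handler.py | get_calls_including_zeroes
-- ===== SOURCE A (Python) =====
-- def get_calls_including_zeroes(solution):
--     calls = {}
--     vehicle_calls = []
--     vehicle_index = 1
--     for call in solution:
--         if call == 0:
--             vehicle_calls.append(call)
--             calls[vehicle_index] = vehicle_calls
--             vehicle_index += 1
--             vehicle_calls = []
--         else:
--             vehicle_calls.append(call)
--     calls[vehicle_index] = vehicle_calls
--     return calls
-- ===== SOURCE B (Python) =====
-- def get_calls_including_zeroes(solution):
--     solution = list(solution)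
--     zeros = [i for i, c in enumerate(solution) if c == 0]
--     calls = {}
--     start = 0
--     for v, idx in enumerate(zeros, 1):
--         calls[v] = solution[start:idx + 1]
--         start = idx + 1
--     calls[len(zeros) + 1] = solution[start:]
--     return calls
-- ===== Notes on version B (the rewrite author's own statement) =====
-- stated objective: alternative
-- what changed: Replaces A's accumulate-while-iterating loop (growing a current-vehicle list and flushing it at each zero) with an index-then-slice decomposition: first collect the zero positions, then slice the sequence between consecutive zeros.
import Mathlib
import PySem

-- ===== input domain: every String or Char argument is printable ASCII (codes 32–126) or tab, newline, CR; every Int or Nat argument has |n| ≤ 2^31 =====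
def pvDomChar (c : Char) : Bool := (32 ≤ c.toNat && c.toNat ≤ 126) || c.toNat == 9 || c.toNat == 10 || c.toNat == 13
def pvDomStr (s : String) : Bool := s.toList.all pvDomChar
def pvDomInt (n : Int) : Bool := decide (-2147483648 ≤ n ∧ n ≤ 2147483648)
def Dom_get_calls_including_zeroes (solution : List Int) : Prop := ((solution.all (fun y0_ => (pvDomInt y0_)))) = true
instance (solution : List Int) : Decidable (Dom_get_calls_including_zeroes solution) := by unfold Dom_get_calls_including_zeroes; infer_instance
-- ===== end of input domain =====

-- B replaces A's accumulate-and-flush loop with an index-then-slice decomposition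
-- (collect zero positions, then slice between consecutive zeros); same cost, alternative structure.

-- ===== PORT A =====
def aLoop : List Int → PySem.Dict Int (List Int) → List Int → Int → PySem.Dict Int (List Int)
  | [], calls, vehicle_calls, vehicle_index => calls.insert vehicle_index vehicle_calls
  | call :: rest, calls, vehicle_calls, vehicle_index =>
    if call == 0 then
      aLoop rest (calls.insert vehicle_index (vehicle_calls ++ [call])) [] (vehicle_index + 1)
    else
      aLoop rest calls (vehicle_calls ++ [call]) vehicle_index

def get_calls_including_zeroes (solution : List Int) : List (Int × List Int) :=
  (aLoop solution PySem.Dict.empty [] 1).items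

-- ===== PORT B =====
def get_calls_including_zeroes_alt (solution : List Int) : List (Int × List Int) :=
  let zeros := ((PySem.List.enumerate solution).filter (fun p => p.2 == 0)).map (·.1)
  let st := (PySem.List.enumerate zeros 1).foldl
    (fun (s : PySem.Dict Int (List Int) × Int) p =>
      (s.1.insert p.1 (PySem.List.slice solution (some s.2) (some (p.2 + 1))), p.2 + 1))
    (PySem.Dict.empty, 0)
  (st.1.insert ((zeros.length : Int) + 1) (PySem.List.slice solution (some st.2) none)).items

-- ===== PRECONDITION & SPEC =====
def Spec_get_calls_including_zeroes (solution : List Int) (out : List (Int × List Int)) : Prop := out = get_calls_including_zeroes_alt solution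
instance (solution : List Int) (out : List (Int × List Int)) : Decidable (Spec_get_calls_including_zeroes solution out) := by unfold Spec_get_calls_including_zeroes; infer_instance

-- ===== CLAIM (what is proved, stated in full; the proofs are below) =====
def Claim_equal_get_calls_including_zeroes : Prop := ∀ (solution : List Int), Dom_get_calls_including_zeroes solution → Spec_get_calls_including_zeroes solution (get_calls_including_zeroes solution)

-- ===== LEMMAS AND PROOFS =====

-- the list of vehicle groups (each group is the calls up to and including its terminating 0)
def gz : List Int → List (List Int)
  | [] => [[]]
  | c :: t => if c = 0 then [(0 : Int)] :: gz t
              else match gz t with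
                   | [] => [[c]]
                   | g :: gs => (c :: g) :: gs

def numFrom (vi : Int) : List (List Int) → List (Int × List Int)
  | [] => []
  | g :: gs => (vi, g) :: numFrom (vi + 1) gs

def consHead (vc : List Int) : List (List Int) → List (List Int)
  | [] => [vc]
  | g :: gs => (vc ++ g) :: gs

lemma gz_ne_nil (t : List Int) : gz t ≠ [] := by
  cases t with
  | nil => simp [gz]
  | cons c t =>
    simp only [gz]
    split
    · simp
    · split <;> simp

lemma not_contains_of_keys_lt (calls : PySem.Dict Int (List Int)) (vi : Int)
    (hk : ∀ k ∈ calls.keys, k < vi) : calls.contains vi = false := by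
  by_contra h
  have h' : calls.contains vi = true := by
    cases hc : calls.contains vi
    · exact absurd hc h
    · rfl
  exact absurd (hk vi ((PySem.Dict.contains_iff_mem_keys _ _).mp h')) (lt_irrefl vi)

lemma aLoop_eq (t : List Int) : ∀ (calls : PySem.Dict Int (List Int)) (vc : List Int) (vi : Int),
    (∀ k ∈ calls.keys, k < vi) →
    (aLoop t calls vc vi).items = calls.items ++ numFrom vi (consHead vc (gz t)) := by
  induction t with
  | nil =>
    intro calls vc vi hk
    simp only [aLoop, gz, consHead, numFrom]
    rw [PySem.Dict.items_insert_of_not_contains calls vc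
      (not_contains_of_keys_lt calls vi hk)]
    simp
  | cons c t ih =>
    intro calls vc vi hk
    by_cases hc : c = 0
    · subst hc
      simp only [aLoop, BEq.rfl, if_true]
      rw [ih _ [] (vi + 1) (by
        intro k hkm
        rcases (PySem.Dict.mem_keys_insert ..).mp hkm with h | h
        · omega
        · have := hk k h; omega)]
      rw [PySem.Dict.items_insert_of_not_contains calls (vc ++ [0])
        (not_contains_of_keys_lt calls vi hk)]
      simp only [gz, if_true, consHead, numFrom, List.append_assoc, List.cons_append,
        List.nil_append]
      cases h : gz t with
      | nil => exact absurd h (gz_ne_nil t)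
      | cons g gs => simp
    · have hbc : (c == (0 : Int)) = false := by simp [hc]
      simp only [aLoop, hbc, Bool.false_eq_true, if_false]
      rw [ih calls (vc ++ [c]) vi hk]
      have : consHead (vc ++ [c]) (gz t) = consHead vc (gz (c :: t)) := by
        cases h : gz t with
        | nil => exact absurd h (gz_ne_nil t)
        | cons g gs => simp [gz, hc, h, consHead]
      rw [this]

def zerosFrom (t : List Int) (s : Int) : List Int :=
  ((PySem.List.enumerate t s).filter (fun p => p.2 == 0)).map (·.1)

def sliceGroups (sol : List Int) : Int → List Int → List (List Int)
  | _, [] => []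
  | start, i :: is => PySem.List.slice sol (some start) (some (i + 1)) :: sliceGroups sol (i + 1) is

lemma zerosFrom_nil (s : Int) : zerosFrom [] s = [] := rfl

lemma zerosFrom_cons (c : Int) (t : List Int) (s : Int) :
    zerosFrom (c :: t) s = (if c = 0 then [s] else []) ++ zerosFrom t (s + 1) := by
  simp only [zerosFrom, PySem.List.enumerate_cons, List.filter_cons]
  by_cases h : c = 0 <;> simp [h]

lemma zerosFrom_ge (t : List Int) : ∀ (s : Int), ∀ i ∈ zerosFrom t s, s ≤ i := by
  induction t with
  | nil => intro s i h; simp [zerosFrom_nil] at h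
  | cons c t ih =>
    intro s i h
    rw [zerosFrom_cons] at h
    rcases List.mem_append.mp h with h | h
    · split at h <;> simp at h; omega
    · have := ih (s + 1) i h; omega

lemma length_sliceGroups (sol : List Int) : ∀ (start : Int) (zs : List Int),
    (sliceGroups sol start zs).length = zs.length := by
  intro start zs
  induction zs generalizing start with
  | nil => rfl
  | cons i is ih => simp [sliceGroups, ih]

lemma numFrom_append (gs hs : List (List Int)) : ∀ (v : Int),
    numFrom v (gs ++ hs) = numFrom v gs ++ numFrom (v + gs.length) hs := by
  induction gs with
  | nil => intro v; simp [numFrom]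
  | cons g gs ih =>
    intro v
    simp only [List.cons_append, numFrom, ih (v + 1), List.length_cons]
    congr 3
    push_cast
    omega

lemma numFrom_keys_lt (gs : List (List Int)) : ∀ (v : Int) (k : Int),
    k ∈ (numFrom v gs).map (·.1) → k < v + gs.length := by
  induction gs with
  | nil => intro v k h; simp [numFrom] at h
  | cons g gs ih =>
    intro v k h
    simp only [numFrom, List.map_cons, List.mem_cons] at h
    rcases h with h | h
    · simp only [h]
      simp only [List.length_cons]
      push_cast
      omega
    · have := ih (v + 1) k h
      simp only [List.length_cons]
      push_cast at *
      omega

lemma gld (a d : Int) (l : List Int) : (a :: l).getLastD d = l.getLastD a := by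
  cases l with
  | nil => rfl
  | cons b t =>
    simp only [List.getLastD_eq_getLast?, List.getLast?_cons_cons]
    cases h : (b :: t).getLast? with
    | none => simp [List.getLast?_eq_none_iff] at h
    | some x => simp

lemma foldB (sol : List Int) (zs : List Int) : ∀ (d : PySem.Dict Int (List Int)) (v0 start : Int),
    (∀ k ∈ d.keys, k < v0) →
    ((PySem.List.enumerate zs v0).foldl
      (fun (s : PySem.Dict Int (List Int) × Int) p =>
        (s.1.insert p.1 (PySem.List.slice sol (some s.2) (some (p.2 + 1))), p.2 + 1))
      (d, start)).1.items = d.items ++ numFrom v0 (sliceGroups sol start zs) ∧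
    ((PySem.List.enumerate zs v0).foldl
      (fun (s : PySem.Dict Int (List Int) × Int) p =>
        (s.1.insert p.1 (PySem.List.slice sol (some s.2) (some (p.2 + 1))), p.2 + 1))
      (d, start)).2 = zs.getLastD (start - 1) + 1 := by
  induction zs with
  | nil =>
    intro d v0 start hk
    simp [PySem.List.enumerate_nil, sliceGroups, numFrom]
  | cons i is ih =>
    intro d v0 start hk
    rw [PySem.List.enumerate_cons]
    simp only [List.foldl_cons]
    have hk' : ∀ k ∈ (d.insert v0 (PySem.List.slice sol (some start) (some (i + 1)))).keys,
        k < v0 + 1 := by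
      intro k hkm
      rcases (PySem.Dict.mem_keys_insert ..).mp hkm with h | h
      · omega
      · have := hk k h; omega
    obtain ⟨h1, h2⟩ := ih (d.insert v0 (PySem.List.slice sol (some start) (some (i + 1))))
      (v0 + 1) (i + 1) hk'
    refine ⟨?_, ?_⟩
    · rw [h1, PySem.Dict.items_insert_of_not_contains d
        (PySem.List.slice sol (some start) (some (i + 1))) (not_contains_of_keys_lt d v0 hk)]
      simp [sliceGroups, numFrom]
    · rw [h2, gld]
      norm_num

lemma groups_eq (t : List Int) : ∀ (pre : List Int),
    sliceGroups (pre ++ t) (pre.length : Int) (zerosFrom t (pre.length : Int))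
      ++ [PySem.List.slice (pre ++ t)
            (some ((zerosFrom t (pre.length : Int)).getLastD ((pre.length : Int) - 1) + 1)) none]
    = gz t := by
  induction t with
  | nil =>
    intro pre
    simp only [zerosFrom_nil, sliceGroups, List.nil_append, gz, List.getLastD_nil,
      List.append_nil, sub_add_cancel]
    rw [PySem.List.slice_from_natCast, List.drop_length]
  | cons c t ih =>
    intro pre
    by_cases hc : c = 0
    · subst hc
      rw [zerosFrom_cons, if_pos rfl, List.singleton_append]
      have hIH := ih (pre ++ [0])
      have hlen : (((pre ++ [0]).length : Nat) : Int) = (pre.length : Int) + 1 := by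
        simp
      rw [hlen, List.append_assoc] at hIH
      simp only [List.singleton_append] at hIH
      simp only [sliceGroups, gld]
      have hsl : PySem.List.slice (pre ++ 0 :: t) (some (pre.length : Int))
          (some ((pre.length : Int) + 1)) = [0] := by
        have h1 : ((pre.length : Int) + 1) = ((pre.length + 1 : Nat) : Int) := by push_cast; omega
        rw [h1, PySem.List.slice_natCast]
        simp
      have harith : (pre.length : Int) + 1 - 1 = (pre.length : Int) := by omega
      rw [harith] at hIH
      rw [hsl, gz]
      rw [List.cons_append, hIH]
      simp only [if_true]
    · rw [zerosFrom_cons, if_neg hc, List.nil_append]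
      have hIH := ih (pre ++ [c])
      have hlen : (((pre ++ [c]).length : Nat) : Int) = (pre.length : Int) + 1 := by
        simp
      rw [hlen, List.append_assoc] at hIH
      simp only [List.singleton_append] at hIH
      have harith : (pre.length : Int) + 1 - 1 = (pre.length : Int) := by omega
      rw [harith] at hIH
      cases hzs : zerosFrom t ((pre.length : Int) + 1) with
      | nil =>
        rw [hzs] at hIH
        simp only [sliceGroups, List.getLastD_nil, List.nil_append, sub_add_cancel] at hIH ⊢
        have hd1 : PySem.List.slice (pre ++ c :: t) (some (pre.length : Int)) none
            = c :: t := by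
          rw [PySem.List.slice_from_natCast, List.drop_left]
        have hd2 : PySem.List.slice (pre ++ c :: t) (some ((pre.length : Int) + 1)) none
            = t := by
          have h1 : ((pre.length : Int) + 1) = (((pre ++ [c]).length : Nat) : Int) := by
            simp
          rw [h1, PySem.List.slice_from_natCast,
            show pre ++ c :: t = (pre ++ [c]) ++ t by simp, List.drop_left]
        rw [hd2] at hIH
        rw [hd1, gz, if_neg hc, ← hIH]
      | cons i is =>
        rw [hzs] at hIH
        have hige : (pre.length : Int) + 1 ≤ i := by
          exact zerosFrom_ge t ((pre.length : Int) + 1) i (hzs ▸ List.mem_cons_self ..)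
        simp only [sliceGroups, gld] at hIH ⊢
        have hsplit : PySem.List.slice (pre ++ c :: t) (some (pre.length : Int)) (some (i + 1))
            = c :: PySem.List.slice (pre ++ c :: t) (some ((pre.length : Int) + 1))
                (some (i + 1)) := by
          have ei : i + 1 = ((i.toNat + 1 : Nat) : Int) := by omega
          have ep : (pre.length : Int) + 1 = ((pre.length + 1 : Nat) : Int) := by
            push_cast; omega
          rw [ei, ep, PySem.List.slice_natCast, PySem.List.slice_natCast, List.drop_left,
            show pre ++ c :: t = (pre ++ [c]) ++ t by simp]
          rw [show ((pre ++ [c]) ++ t).drop (pre.length + 1) =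
              ((pre ++ [c]) ++ t).drop (pre ++ [c]).length by simp,
            List.drop_left]
          have e3 : i.toNat + 1 - pre.length = ((i.toNat + 1) - (pre.length + 1)) + 1 := by
            omega
          rw [e3, List.take_succ_cons]
        rw [hsplit]
        simp only [gz, if_neg hc, ← hIH]
        rfl

-- ===== VERDICT (by name: the statement is the Claim_ definition above) =====
lemma consHead_nil_eq (t : List Int) : consHead [] (gz t) = gz t := by
  cases h : gz t with
  | nil => exact absurd h (gz_ne_nil t)
  | cons g gs => simp [consHead]

lemma portA_eq (solution : List Int) :
    get_calls_including_zeroes solution = numFrom 1 (gz solution) := by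
  unfold get_calls_including_zeroes
  rw [aLoop_eq solution PySem.Dict.empty [] 1 (by intro k hk; simp [PySem.Dict.keys_empty] at hk)]
  rw [consHead_nil_eq]
  rfl

lemma portB_eq (solution : List Int) :
    get_calls_including_zeroes_alt solution = numFrom 1 (gz solution) := by
  unfold get_calls_including_zeroes_alt
  have hz : ((PySem.List.enumerate solution).filter (fun p => p.2 == 0)).map (·.1)
      = zerosFrom solution 0 := rfl
  obtain ⟨h1, h2⟩ := foldB solution (zerosFrom solution 0) PySem.Dict.empty 1 0
    (by intro k hk; simp [PySem.Dict.keys_empty] at hk)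
  have hkey : ∀ k ∈ ((PySem.List.enumerate (zerosFrom solution 0) 1).foldl
      (fun (s : PySem.Dict Int (List Int) × Int) p =>
        (s.1.insert p.1 (PySem.List.slice solution (some s.2) (some (p.2 + 1))), p.2 + 1))
      (PySem.Dict.empty, 0)).1.keys,
      k < ((zerosFrom solution 0).length : Int) + 1 := by
    intro k hk
    simp only [PySem.Dict.keys, h1] at hk
    have := numFrom_keys_lt (sliceGroups solution 0 (zerosFrom solution 0)) 1 k hk
    rw [length_sliceGroups] at this
    omega
  simp only [hz]
  rw [PySem.Dict.items_insert_of_not_contains _ _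
    (not_contains_of_keys_lt _ _ hkey), h1, h2]
  have hge := groups_eq solution []
  simp only [List.length_nil, Nat.cast_zero, List.nil_append, zero_sub] at hge
  have hz01 : (0 : Int) - 1 = -1 := by omega
  rw [hz01]
  rw [← hge, numFrom_append]
  simp only [numFrom, length_sliceGroups]
  congr 2
  ring

theorem get_calls_including_zeroes_spec : Claim_equal_get_calls_including_zeroes := by
  intro solution _
  unfold Spec_get_calls_including_zeroes
  rw [portA_eq, portB_eq]
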